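-- pv_equiv track=rewrite | github.com/odsod/genetic-expression-generator | arithmetic_expr.py | decode_next_gene
-- ===== SOURCE A (Python) =====
-- GENE_SIZE = 4
--
-- def decode_next_gene(chromosome, gene_dict):
--     next_gene = chromosome[:GENE_SIZE]
--     remaining_chromosome = chromosome[GENE_SIZE:]
--     if next_gene in gene_dict:
--         return gene_dict[next_gene], remaining_chromosome
--     elif remaining_chromosome:
--         return decode_next_gene(remaining_chromosome, gene_dict)
--     else:
--         return None, None
-- ===== SOURCE B (Python) =====
-- GENE_SIZE = 4
--
-- def decode_next_gene(chromosome, gene_dict):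
--     # Scan gene-sized windows by start index instead of recursively
--     # re-slicing the chromosome.
--     for i in range(0, len(chromosome), GENE_SIZE):
--         gene = chromosome[i:i + GENE_SIZE]
--         if gene in gene_dict:
--             return gene_dict[gene], chromosome[i + GENE_SIZE:]
--     return None, None
-- ===== Notes on version B (the rewrite author's own statement) =====
-- stated objective: faster
-- what changed: Replaces A's tail recursion, which copies the remaining chromosome by re-slicing it at every step, with a single loop over gene-start indices 0,4,8,... that slices only the 4-char gene from the original string.
-- intended difference: On the empty chromosome when '' happens to be a key of gene_dict, A returns (gene_dict[''], '') because it looks up the empty slice; B returns (None, None), the intended value since an empty chromosome contains no gene. — e.g. on decode_next_gene("", [("", "x")]): A returns (some "x", some ""), B returns (none, none)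
import Mathlib
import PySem

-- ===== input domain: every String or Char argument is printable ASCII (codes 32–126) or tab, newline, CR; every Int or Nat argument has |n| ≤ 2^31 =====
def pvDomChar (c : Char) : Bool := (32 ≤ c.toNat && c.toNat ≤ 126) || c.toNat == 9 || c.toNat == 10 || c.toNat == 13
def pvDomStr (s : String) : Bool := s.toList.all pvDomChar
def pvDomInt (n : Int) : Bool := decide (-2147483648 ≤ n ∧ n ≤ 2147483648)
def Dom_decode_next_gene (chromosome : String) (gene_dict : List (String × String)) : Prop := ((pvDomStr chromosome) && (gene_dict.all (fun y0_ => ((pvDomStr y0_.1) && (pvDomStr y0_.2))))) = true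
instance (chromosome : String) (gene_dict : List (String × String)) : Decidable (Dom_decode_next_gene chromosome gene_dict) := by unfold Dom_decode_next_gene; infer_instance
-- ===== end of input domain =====

-- B replaces A's tail recursion (which re-slices the remaining chromosome each step) by a
-- single indexed scan over gene-start offsets 0, 4, 8, …; B returns (none, none) on the empty
-- chromosome where A still looks up the empty slice (see D_ below).

-- ===== PORT A =====
-- tail recursion of Source A: gene = chromosome[:4], remaining = chromosome[4:]
def decodeA_go (gene_dict : PySem.Dict String String) (cs : List Char) : Option String × Option String :=
  if gene_dict.contains (String.ofList (PySem.List.slice cs none (some 4))) then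
    (gene_dict.get? (String.ofList (PySem.List.slice cs none (some 4))),
     some (String.ofList (PySem.List.slice cs (some 4) none)))
  else if h : PySem.List.slice cs (some 4) none ≠ [] then
    decodeA_go gene_dict (PySem.List.slice cs (some 4) none)
  else (none, none)
termination_by cs.length
decreasing_by
  rw [PySem.List.slice_from cs (by norm_num : (0:Int) ≤ 4)] at h ⊢
  have := List.drop_eq_nil_iff.not.mp h
  simp only [List.length_drop]
  omega

def decode_next_gene (chromosome : String) (gene_dict : List (String × String)) : Option String × Option String :=
  decodeA_go (PySem.Dict.mk gene_dict) chromosome.toList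

-- ===== PORT B =====
-- Source B's loop body: for each start index i in range(0, len, 4), gene = chromosome[i:i+4];
-- on hit return (gene_dict[gene], chromosome[i+4:])
def decodeB_go (gene_dict : PySem.Dict String String) (cs : List Char) : List Int → Option String × Option String
  | [] => (none, none)
  | i :: rest =>
    if gene_dict.contains (String.ofList (PySem.List.slice cs (some i) (some (i + 4)))) then
      (gene_dict.get? (String.ofList (PySem.List.slice cs (some i) (some (i + 4)))),
       some (String.ofList (PySem.List.slice cs (some (i + 4)) none)))
    else decodeB_go gene_dict cs rest

def decode_next_gene_alt (chromosome : String) (gene_dict : List (String × String)) : Option String × Option String :=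
  decodeB_go (PySem.Dict.mk gene_dict) chromosome.toList
    (PySem.List.pyRange 0 (chromosome.toList.length : Int) 4)

-- ===== PRECONDITION & SPEC =====
-- On the empty chromosome with '' a key of gene_dict, A returns (gene_dict[''], '') because it
-- looks up the empty slice; B returns (none, none), the intended value: an empty chromosome has no gene.
def D_decode_next_gene (chromosome : String) (gene_dict : List (String × String)) : Prop :=
  chromosome = "" ∧ "" ∈ gene_dict.map Prod.fst
instance (chromosome : String) (gene_dict : List (String × String)) : Decidable (D_decode_next_gene chromosome gene_dict) := by unfold D_decode_next_gene; infer_instance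

def Spec_decode_next_gene (chromosome : String) (gene_dict : List (String × String)) (out : Option String × Option String) : Prop := ¬ D_decode_next_gene chromosome gene_dict → out = decode_next_gene_alt chromosome gene_dict
instance (chromosome : String) (gene_dict : List (String × String)) (out : Option String × Option String) : Decidable (Spec_decode_next_gene chromosome gene_dict out) := by unfold Spec_decode_next_gene; infer_instance

def pvDiffWitness_decode_next_gene : String × (List (String × String)) := ("", [("", "x")])
def pvDiffWitnessOut_decode_next_gene : (Option String × Option String) × (Option String × Option String) :=
  ((some "x", some ""), (none, none))

-- ===== CLAIM (what is proved, stated in full; the proofs are below) =====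
def Claim_unchanged_decode_next_gene : Prop := ∀ (chromosome : String) (gene_dict : List (String × String)), Dom_decode_next_gene chromosome gene_dict → Spec_decode_next_gene chromosome gene_dict (decode_next_gene chromosome gene_dict)
def Claim_changed_decode_next_gene : Prop := Dom_decode_next_gene (pvDiffWitness_decode_next_gene.1) (pvDiffWitness_decode_next_gene.2) ∧ D_decode_next_gene (pvDiffWitness_decode_next_gene.1) (pvDiffWitness_decode_next_gene.2) ∧ decode_next_gene (pvDiffWitness_decode_next_gene.1) (pvDiffWitness_decode_next_gene.2) = pvDiffWitnessOut_decode_next_gene.1 ∧ decode_next_gene_alt (pvDiffWitness_decode_next_gene.1) (pvDiffWitness_decode_next_gene.2) = pvDiffWitnessOut_decode_next_gene.2 ∧ pvDiffWitnessOut_decode_next_gene.1 ≠ pvDiffWitnessOut_decode_next_gene.2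
def Claim_exact_decode_next_gene : Prop := ∀ (chromosome : String) (gene_dict : List (String × String)), Dom_decode_next_gene chromosome gene_dict → D_decode_next_gene chromosome gene_dict → decode_next_gene chromosome gene_dict ≠ decode_next_gene_alt chromosome gene_dict

-- ===== LEMMAS AND PROOFS =====

-- splitting off the first offset of B's range of gene starts
lemma range_split (m : Int) (hm : 0 < m) :
    PySem.List.pyRange 0 m 4 = 0 :: (PySem.List.pyRange 0 (m - 4) 4).map (· + 4) := by
  rw [PySem.List.pyRange_of_pos 0 m (by norm_num : (0:Int) < 4),
      PySem.List.pyRange_of_pos 0 (m - 4) (by norm_num : (0:Int) < 4)]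
  have h1 : ((m - 0 + 4 - 1) / 4).toNat =
      (if 0 < m - 4 then ((m - 4 - 0 + 4 - 1) / 4).toNat else 0) + 1 := by
    split_ifs with h <;> omega
  rw [if_pos hm, h1, List.range_succ_eq_map]
  simp only [List.map_cons, List.map_map]
  refine congrArg₂ _ (by norm_num) ?_
  apply List.map_congr_left
  intro k _
  simp only [Function.comp]
  push_cast
  ring

-- B's scan over offsets shifted by 4 is B's scan of the 4-dropped chromosome
lemma shift_lemma (d : PySem.Dict String String) (cs : List Char) (is : List Int)
    (h : ∀ i ∈ is, 0 ≤ i) :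
    decodeB_go d cs (is.map (· + 4)) = decodeB_go d (cs.drop 4) is := by
  induction is with
  | nil => simp [decodeB_go]
  | cons i rest ih =>
    have hi : 0 ≤ i := h i (by simp)
    have hs1 : PySem.List.slice cs (some (i + 4)) (some (i + 4 + 4)) =
        PySem.List.slice (cs.drop 4) (some i) (some (i + 4)) := by
      have e1 : (i + 4).toNat = i.toNat + 4 := by omega
      have e2 : (i + 4 + 4).toNat = i.toNat + 4 + 4 := by omega
      rw [PySem.List.slice_toNat cs (by omega) (by omega),
          PySem.List.slice_toNat (cs.drop 4) hi (by omega), List.drop_drop, e1, e2, Nat.add_comm 4 i.toNat]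
      congr 1
      omega
    have hs2 : PySem.List.slice cs (some (i + 4 + 4)) none =
        PySem.List.slice (cs.drop 4) (some (i + 4)) none := by
      rw [PySem.List.slice_from cs (by omega : (0:Int) ≤ i + 4 + 4),
          PySem.List.slice_from (cs.drop 4) (by omega : (0:Int) ≤ i + 4), List.drop_drop]
      congr 1; omega
    simp only [List.map_cons, decodeB_go, hs1, hs2]
    split
    · rfl
    · exact ih (fun j hj => h j (by simp [hj]))

lemma main_lemma (d : PySem.Dict String String) :
    ∀ (n : Nat) (cs : List Char), cs.length ≤ n →
      (cs = [] → d.contains "" = false) →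
      decodeA_go d cs = decodeB_go d cs (PySem.List.pyRange 0 (cs.length : Int) 4) := by
  intro n
  induction n with
  | zero =>
    intro cs hcs _h0
    have : cs = [] := List.eq_nil_of_length_eq_zero (by omega)
    subst this
    have hr : PySem.List.pyRange 0 ((0 : Nat) : Int) 4 = [] := by decide
    simp only [List.length_nil, hr, decodeB_go]
    rw [decodeA_go]
    rw [if_neg (by simp [_h0 rfl, PySem.List.slice])]
    rw [dif_neg (by simp [PySem.List.slice])]
  | succ n ih =>
    intro cs hcs h0
    by_cases hnil : cs = []
    · subst hnil
      have hr : PySem.List.pyRange 0 ((0 : Nat) : Int) 4 = [] := by decide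
      simp only [List.length_nil, hr, decodeB_go]
      rw [decodeA_go]
      rw [if_neg (by simp [h0 rfl, PySem.List.slice])]
      rw [dif_neg (by simp [PySem.List.slice])]
    · have hpos : 0 < cs.length := List.length_pos_iff.mpr hnil
      rw [range_split (cs.length : Int) (by exact_mod_cast hpos)]
      rw [decodeA_go]
      simp only [decodeB_go]
      have e04 : (0 : Int) + 4 = 4 := by norm_num
      rw [e04, PySem.List.slice_zero_start]
      split
      · rfl
      · by_cases hrem : PySem.List.slice cs (some 4) none = []
        · rw [dif_neg (by simpa using hrem)]
          have hlen : cs.length ≤ 4 := by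
            rw [PySem.List.slice_from cs (by norm_num : (0:Int) ≤ 4)] at hrem
            have := List.drop_eq_nil_iff.mp hrem
            omega
          have : (PySem.List.pyRange 0 ((cs.length : Int) - 4) 4).map (· + 4) = [] := by
            rw [PySem.List.pyRange_of_pos _ _ (by norm_num : (0:Int) < 4)]
            rw [if_neg (by omega)]
            simp
          rw [this]
          simp [decodeB_go]
        · rw [dif_pos hrem]
          rw [PySem.List.slice_from cs (by norm_num : (0:Int) ≤ 4)] at hrem ⊢
          have hlen : 4 < cs.length := by
            rcases Nat.lt_or_ge 4 cs.length with h | h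
            · exact h
            · exact absurd (List.drop_eq_nil_iff.mpr (by omega)) hrem
          have hmax : (cs.length : Int) - 4 = ((cs.drop 4).length : Int) := by
            simp only [List.length_drop]; omega
          rw [hmax, shift_lemma d cs _ ?_]
          · exact ih (cs.drop 4) (by simp only [List.length_drop]; omega)
              (fun h => absurd h hrem)
          · intro i hi
            rw [PySem.List.pyRange_of_pos _ _ (by norm_num : (0:Int) < 4)] at hi
            rcases List.mem_map.mp hi with ⟨k, _, rfl⟩
            omega

lemma contains_of_D (gene_dict : List (String × String))
    (h : "" ∈ gene_dict.map Prod.fst) : (PySem.Dict.mk gene_dict).contains "" = true := by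
  rw [PySem.Dict.contains_iff_mem_keys]
  simpa [PySem.Dict.keys] using h

lemma mem_of_contains (gene_dict : List (String × String))
    (h : (PySem.Dict.mk gene_dict).contains "" = true) : "" ∈ gene_dict.map Prod.fst := by
  rw [PySem.Dict.contains_iff_mem_keys] at h
  simpa [PySem.Dict.keys] using h

-- ===== VERDICT (by name: the statement is the Claim_ definition above) =====
theorem decode_next_gene_spec : Claim_unchanged_decode_next_gene := by
  intro chromosome gene_dict _ hD
  unfold decode_next_gene decode_next_gene_alt
  apply main_lemma _ chromosome.toList.length chromosome.toList le_rfl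
  intro hnil
  by_contra hc
  apply hD
  refine ⟨by simpa using hnil, ?_⟩
  apply mem_of_contains
  cases h : (PySem.Dict.mk gene_dict).contains "" with
  | false => exact absurd h hc
  | true => rfl

theorem decode_next_gene_changed : Claim_changed_decode_next_gene := by
  unfold Claim_changed_decode_next_gene
  refine ⟨by decide, by decide, ?_, by decide, by decide⟩
  show decode_next_gene "" [("", "x")] = (some "x", some "")
  unfold decode_next_gene
  rw [decodeA_go]
  decide

theorem decode_next_gene_tight : Claim_exact_decode_next_gene := by
  intro chromosome gene_dict _ hD heq
  obtain ⟨h1, h2⟩ := hD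
  subst h1
  have hc := contains_of_D gene_dict h2
  have hx : ("" : String).toList = ([] : List Char) := rfl
  rw [decode_next_gene, decode_next_gene_alt, hx] at heq
  rw [decodeA_go] at heq
  rw [if_pos (by simpa [PySem.List.slice] using hc)] at heq
  simp [decodeB_go, PySem.List.pyRange] at heq
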